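-- pv_equiv track=rewrite | github.com/bcollazo/catanatron | catanatron/catanatron/web/models.py | _first_city_turn
-- ===== SOURCE A (Python) =====
-- def _first_city_turn(action_records: list, us_color: str | None) -> int | None:
--     if us_color is None:
--         return None
--     turns_elapsed = 0
--     for action_record in action_records:
--         if not action_record or not action_record[0]:
--             continue
--         action = action_record[0]
--         if action[1] == "END_TURN":
--             turns_elapsed += 1
--         if action[0] == us_color and action[1] == "BUILD_CITY":
--             return turns_elapsed
--     return None
-- ===== SOURCE B (Python) =====
-- def _first_city_turn(action_records: list, us_color):
--     if us_color is None:
--         return None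
--     idx = next(
--         (i for i, r in enumerate(action_records)
--          if r and r[0] and r[0][0] == us_color and r[0][1] == "BUILD_CITY"),
--         None,
--     )
--     if idx is None:
--         return None
--     return sum(1 for r in action_records[:idx] if r and r[0] and r[0][1] == "END_TURN")
-- ===== Notes on version B (the rewrite author's own statement) =====
-- stated objective: alternative
-- what changed: Replaces A's fused single-pass scan (running END_TURN counter with early return at the first city) by a find-then-count decomposition: first locate the index of the first BUILD_CITY record by us_color with findIdx/next, then count END_TURN records in the strict prefix before that index.
import Mathlib
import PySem

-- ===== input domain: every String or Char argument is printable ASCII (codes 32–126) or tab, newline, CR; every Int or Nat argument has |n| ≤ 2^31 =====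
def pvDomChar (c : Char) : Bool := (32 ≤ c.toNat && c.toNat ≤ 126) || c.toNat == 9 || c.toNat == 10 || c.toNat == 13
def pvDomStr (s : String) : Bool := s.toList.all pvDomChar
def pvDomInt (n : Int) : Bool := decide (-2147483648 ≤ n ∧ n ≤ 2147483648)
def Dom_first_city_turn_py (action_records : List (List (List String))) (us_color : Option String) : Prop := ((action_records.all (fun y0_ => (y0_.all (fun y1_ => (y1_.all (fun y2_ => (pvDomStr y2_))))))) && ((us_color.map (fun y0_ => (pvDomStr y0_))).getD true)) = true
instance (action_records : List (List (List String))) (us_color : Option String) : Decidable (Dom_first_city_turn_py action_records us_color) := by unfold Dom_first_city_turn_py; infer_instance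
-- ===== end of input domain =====

-- B replaces A's fused early-exit scan (running END_TURN counter) by a find-first-city-index
-- pass followed by an END_TURN count over the strict prefix (objective: alternative decomposition).

-- ===== PORT A =====
-- A's loop: skip falsy records, count END_TURN, return the counter at the first BUILD_CITY by us_color.
-- Python's action[1] raises IndexError on a one-element action; Pre_ excludes exactly those runs,
-- so the pyGetD default "" is never the returned behaviour inside Pre_.
def pvAloop (c : String) : List (List (List String)) → Int → Option Int
  | [], _ => none
  | action_record :: rest, turns_elapsed =>
    if action_record.isEmpty || (action_record.headD []).isEmpty then
      pvAloop c rest turns_elapsed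
    else
      let action := action_record.headD []
      let turns' := if PySem.List.pyGetD action 1 "" == "END_TURN" then turns_elapsed + 1 else turns_elapsed
      if PySem.List.pyGetD action 0 "" == c && PySem.List.pyGetD action 1 "" == "BUILD_CITY" then
        some turns'
      else
        pvAloop c rest turns'

def first_city_turn_py (action_records : List (List (List String))) (us_color : Option String) : Option Int :=
  match us_color with
  | none => none
  | some c => pvAloop c action_records 0

-- ===== PORT B =====
-- truthy record r whose first action is a BUILD_CITY by c (short-circuit order as in Source B)
def pvBcity (c : String) (r : List (List String)) : Bool :=
  !r.isEmpty && !(r.headD []).isEmpty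
    && (PySem.List.pyGetD (r.headD []) 0 "" == c)
    && (PySem.List.pyGetD (r.headD []) 1 "" == "BUILD_CITY")

-- truthy record whose first action is an END_TURN
def pvBend (r : List (List String)) : Bool :=
  !r.isEmpty && !(r.headD []).isEmpty && (PySem.List.pyGetD (r.headD []) 1 "" == "END_TURN")

def first_city_turn_py_alt (action_records : List (List (List String))) (us_color : Option String) : Option Int :=
  match us_color with
  | none => none
  | some c =>
    -- next((i for i, r in enumerate(...) if ...), None)
    match action_records.findIdx? (pvBcity c) with
    | none => none
    | some i =>
      -- sum(1 for r in action_records[:idx] if ...)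
      some ((List.take i action_records).countP pvBend : Int)

-- ===== PRECONDITION & SPEC =====
-- Pre_ excludes exactly the inputs on which Python A raises IndexError: us_color is set and some
-- record with a nonempty one-element first action is reached before any earlier BUILD_CITY return.
def Pre_first_city_turn_py (action_records : List (List (List String))) (us_color : Option String) : Prop :=
  ∀ c ∈ us_color.toList,
    ∀ p ∈ action_records.zipIdx,
      (¬ p.1.isEmpty ∧ ¬ (p.1.headD []).isEmpty ∧ (p.1.headD []).length < 2) →
      ∃ q ∈ action_records.zipIdx, q.2 < p.2 ∧
        2 ≤ (q.1.headD []).length ∧ pvBcity c q.1 = true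

instance (action_records : List (List (List String))) (us_color : Option String) : Decidable (Pre_first_city_turn_py action_records us_color) := by unfold Pre_first_city_turn_py; infer_instance

def pvWitness_first_city_turn_py : List (List (List String)) × Option String :=
  ([[["red", "END_TURN"]], [], [[]], [["red", "BUILD_CITY"]]], some "red")

def Spec_first_city_turn_py (action_records : List (List (List String))) (us_color : Option String) (out : Option Int) : Prop := out = first_city_turn_py_alt action_records us_color
instance (action_records : List (List (List String))) (us_color : Option String) (out : Option Int) : Decidable (Spec_first_city_turn_py action_records us_color out) := by unfold Spec_first_city_turn_py; infer_instance

-- ===== CLAIM (what is proved, stated in full; the proofs are below) =====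
def Claim_equal_first_city_turn_py : Prop := ∀ (action_records : List (List (List String))) (us_color : Option String), Dom_first_city_turn_py action_records us_color → Pre_first_city_turn_py action_records us_color → Spec_first_city_turn_py action_records us_color (first_city_turn_py action_records us_color)

-- ===== LEMMAS AND PROOFS =====

-- The two decompositions agree for every accumulator value (no Pre_ needed:
-- both ports read the out-of-range index with the same default).
theorem pvAloop_eq_find_count (c : String) (ars : List (List (List String))) :
    ∀ t : Int,
      pvAloop c ars t =
        match ars.findIdx? (pvBcity c) with
        | none => none
        | some i => some (t + ((List.take i ars).countP pvBend : Int)) := by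
  induction ars with
  | nil => intro t; simp [pvAloop]
  | cons r rest ih =>
    intro t
    rw [List.findIdx?_cons]
    match r with
    | [] =>
      have hb : pvBcity c [] = false := rfl
      have he : pvBend [] = false := rfl
      rw [hb]
      have hA : pvAloop c ([] :: rest) t = pvAloop c rest t := by simp [pvAloop]
      rw [hA, ih t]
      cases h : rest.findIdx? (pvBcity c) with
      | none => simp
      | some i => simp [he]
    | [] :: as =>
      have hb : pvBcity c ([] :: as) = false := by simp [pvBcity]
      have he : pvBend ([] :: as) = false := by simp [pvBend]
      rw [hb]
      have hA : pvAloop c (([] :: as) :: rest) t = pvAloop c rest t := by simp [pvAloop]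
      rw [hA, ih t]
      cases h : rest.findIdx? (pvBcity c) with
      | none => simp
      | some i => simp [he]
    | (x :: xs) :: as =>
      have hb : pvBcity c ((x :: xs) :: as)
          = ((PySem.List.pyGetD (x :: xs) 0 "" == c)
             && (PySem.List.pyGetD (x :: xs) 1 "" == "BUILD_CITY")) := by
        simp [pvBcity]
      have he : pvBend ((x :: xs) :: as)
          = (PySem.List.pyGetD (x :: xs) 1 "" == "END_TURN") := by
        simp [pvBend]
      have hA : pvAloop c (((x :: xs) :: as) :: rest) t
          = (let turns' := if PySem.List.pyGetD (x :: xs) 1 "" == "END_TURN" then t + 1 else t;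
             if PySem.List.pyGetD (x :: xs) 0 "" == c
                && PySem.List.pyGetD (x :: xs) 1 "" == "BUILD_CITY" then
               some turns'
             else pvAloop c rest turns') := by
        simp [pvAloop]
      rw [hb, hA]
      by_cases hcity : ((PySem.List.pyGetD (x :: xs) 0 "" == c)
          && (PySem.List.pyGetD (x :: xs) 1 "" == "BUILD_CITY")) = true
      · have h1 : PySem.List.pyGetD (x :: xs) 1 "" = "BUILD_CITY" := by
          have := (Bool.and_eq_true _ _).mp hcity
          exact beq_iff_eq.mp this.2
        have hne : (PySem.List.pyGetD (x :: xs) 1 "" == "END_TURN") = false := by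
          simp [h1]
        rw [hcity]
        simp [hne]
      · have hcity' : ((PySem.List.pyGetD (x :: xs) 0 "" == c)
            && (PySem.List.pyGetD (x :: xs) 1 "" == "BUILD_CITY")) = false :=
          Bool.eq_false_iff.mpr hcity
        rw [hcity']
        simp only [Bool.false_eq_true, if_false]
        rw [ih]
        cases h : rest.findIdx? (pvBcity c) with
        | none => simp
        | some i =>
          simp only [Option.map_some, List.take_succ_cons, List.countP_cons, he]
          by_cases hend : (PySem.List.pyGetD (x :: xs) 1 "" == "END_TURN") = true
          · have hend2 : PySem.List.pyGetD (x :: xs) 1 "" = "END_TURN" := beq_iff_eq.mp hend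
            simp only [hend2, beq_self_eq_true, if_true, Option.some.injEq]
            push_cast
            ring
          · have hend' := Bool.eq_false_iff.mpr hend
            simp [hend']

-- ===== VERDICT (by name: the statement is the Claim_ definition above) =====
theorem first_city_turn_py_spec : Claim_equal_first_city_turn_py := by
  intro ars us _ _
  unfold Spec_first_city_turn_py first_city_turn_py first_city_turn_py_alt
  cases us with
  | none => rfl
  | some c =>
    simp only
    rw [pvAloop_eq_find_count c ars 0]
    cases h : ars.findIdx? (pvBcity c) <;> simp
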